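-- pv_equiv track=rewrite | github.com/lubov0avduhova/Homework_5_python | Task_2.py | how_many_take
-- ===== SOURCE A (Python) =====
-- def how_many_take(candies):
--     move = 28
--     result = 0
--     list_num = []
--     i = 1
--     while(result < candies):
--         result = i * (move + 1)
--         list_num.append(result)
--         i+=1
--     return list_num
-- ===== SOURCE B (Python) =====
-- def how_many_take(candies):
--     k = -(-candies // 29) if candies > 0 else 0
--     return [29 * i for i in range(1, k + 1)]
-- ===== Notes on version B (the rewrite author's own statement) =====
-- stated objective: faster
-- what changed: Replaces the data-dependent while-loop that appends multiples of 29 until reaching candies with a closed-form count k = ceil(candies/29) and a direct list comprehension over range(1, k+1).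
import Mathlib
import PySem

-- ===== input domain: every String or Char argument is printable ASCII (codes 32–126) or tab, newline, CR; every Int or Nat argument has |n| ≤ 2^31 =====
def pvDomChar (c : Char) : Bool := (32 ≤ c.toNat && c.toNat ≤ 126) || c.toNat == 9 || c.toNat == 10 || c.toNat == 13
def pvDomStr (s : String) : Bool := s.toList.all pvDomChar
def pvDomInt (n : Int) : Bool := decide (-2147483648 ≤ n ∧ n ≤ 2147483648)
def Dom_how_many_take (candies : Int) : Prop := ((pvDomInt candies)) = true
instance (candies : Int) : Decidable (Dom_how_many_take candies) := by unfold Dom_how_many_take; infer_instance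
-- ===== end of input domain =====

-- B replaces A's while-loop (append multiples of 29 until the running value reaches candies)
-- by a closed-form count k = ceil(candies/29) and a direct range comprehension; same return value.

-- ===== PORT A =====
-- fuel only makes the while-loop total; candies.toNat + 1 always suffices (proved below)
def how_many_take_loop (fuel : Nat) (candies result i : Int) (acc : List Int) : List Int :=
  match fuel with
  | 0 => acc
  | fuel + 1 =>
    if result < candies then
      how_many_take_loop fuel candies (i * (28 + 1)) (i + 1) (acc ++ [i * (28 + 1)])
    else acc

def how_many_take (candies : Int) : List Int :=
  how_many_take_loop (candies.toNat + 1) candies 0 1 []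

-- ===== PORT B =====
def how_many_take_alt (candies : Int) : List Int :=
  let k : Int := if candies > 0 then -(PySem.Int.floordiv (-candies) 29) else 0
  (PySem.List.pyRange 1 (k + 1) 1).map (fun i => 29 * i)

-- ===== PRECONDITION & SPEC =====
def Spec_how_many_take (candies : Int) (out : List Int) : Prop := out = how_many_take_alt candies
instance (candies : Int) (out : List Int) : Decidable (Spec_how_many_take candies out) := by unfold Spec_how_many_take; infer_instance

-- ===== CLAIM (what is proved, stated in full; the proofs are below) =====
def Claim_equal_how_many_take : Prop := ∀ (candies : Int), Dom_how_many_take candies → Spec_how_many_take candies (how_many_take candies)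

-- ===== LEMMAS AND PROOFS =====

-- ceiling division C = -((-candies) // 29) satisfies (C-1)*29 < candies ≤ C*29
theorem hmt_ceil_bounds (candies : Int) :
    (-(PySem.Int.floordiv (-candies) 29) - 1) * 29 < candies ∧
      candies ≤ -(PySem.Int.floordiv (-candies) 29) * 29 :=
  (PySem.Int.neg_floordiv_neg_eq_iff_of_pos (a := candies) (b := 29)
    (q := -(PySem.Int.floordiv (-candies) 29)) (by norm_num)).mp rfl

-- loop invariant: starting from result = 29*j, i = j+1, with enough fuel, the loop
-- appends exactly the multiples 29*(j+1), …, 29*C where C = ceil(candies/29)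
theorem hmt_loop_eq (fuel : Nat) : ∀ (candies j : Int) (acc : List Int),
    candies ≤ 29 * (j + fuel) →
    how_many_take_loop fuel candies (29 * j) (j + 1) acc =
      acc ++ (PySem.List.pyRange (j + 1) (-(PySem.Int.floordiv (-candies) 29) + 1) 1).map
        (fun i => 29 * i) := by
  induction fuel with
  | zero =>
    intro candies j acc h
    obtain ⟨h1, h2⟩ := hmt_ceil_bounds candies
    simp only [Nat.cast_zero, add_zero] at h
    rw [PySem.List.pyRange_one_eq_nil (by nlinarith)]
    simp [how_many_take_loop]
  | succ n ih =>
    intro candies j acc h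
    obtain ⟨h1, h2⟩ := hmt_ceil_bounds candies
    by_cases hc : 29 * j < candies
    · have hjC : j + 1 ≤ -(PySem.Int.floordiv (-candies) 29) := by nlinarith
      rw [how_many_take_loop, if_pos hc]
      have : (j + 1) * (28 + 1) = 29 * (j + 1) := by ring
      rw [this]
      rw [ih candies (j + 1) (acc ++ [29 * (j + 1)]) (by push_cast at h ⊢; linarith)]
      rw [PySem.List.pyRange_one_cons (a := j + 1) (by linarith)]
      simp
    · rw [how_many_take_loop, if_neg hc]
      rw [PySem.List.pyRange_one_eq_nil (by nlinarith)]
      simp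

-- ===== VERDICT (by name: the statement is the Claim_ definition above) =====
theorem how_many_take_spec : Claim_equal_how_many_take := by
  intro candies _
  unfold Spec_how_many_take how_many_take how_many_take_alt
  have hfuel : candies ≤ 29 * ((0 : Int) + (candies.toNat + 1 : Nat)) := by
    push_cast
    have := Int.self_le_toNat candies
    omega
  have hmain := hmt_loop_eq (candies.toNat + 1) candies 0 [] hfuel
  simp only [mul_zero, zero_add, List.nil_append] at hmain
  rw [hmain]
  by_cases hpos : candies > 0
  · rw [if_pos hpos]
  · rw [if_neg hpos]
    obtain ⟨h1, h2⟩ := hmt_ceil_bounds candies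
    rw [PySem.List.pyRange_one_eq_nil (by nlinarith)]
    simp [PySem.List.pyRange_one_eq_nil]
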